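-- pv_equiv track=rewrite | github.com/miliar/Code_Jam_Webscraper | solutions_python/solutions_year17_round0_nr3/1473.py | problemA
-- ===== SOURCE A (Python) =====
-- def problemA(n, k, case):
-- 	count = 0
-- 	for i in range(len(n)):
-- 		if n[i] == "-" and i+k <= len(n):
-- 			count += 1
-- 			for j in range(k):
-- 				if n[i+j] == "+":
-- 					n[i+j] = "-"
-- 				else:
-- 					n[i+j] = "+"
-- 			i = k + i
-- 	if "-" in n:
-- 		return f'Case #{case}: IMPOSSIBLE\n'
-- 	else:
-- 		return f'Case #{case}: {count}\n'
-- ===== SOURCE B (Python) =====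
-- # Single left-to-right pass tracking per-position flip counts with a difference array,
-- # instead of rewriting each k-window and rescanning; same return value as A
-- # (A mutates n in place, B does not).
-- def problemA(n, k, case):
--     L = len(n)
--     diff = [0] * (L + 1)
--     c = 0
--     count = 0
--     bad = False
--     for i in range(L):
--         c += diff[i]
--         s = n[i]
--         eff = s if c == 0 else ("-" if (s == "+") == (c % 2 == 1) else "+")
--         if eff == "-":
--             if i + k <= L:
--                 count += 1
--                 if k > 0:
--                     c += 1
--                     diff[i + k] -= 1
--                 else:
--                     bad = True
--             else:
--                 bad = True
--     if bad:
--         return f'Case #{case}: IMPOSSIBLE\n'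
--     return f'Case #{case}: {count}\n'
-- ===== Notes on version B (the rewrite author's own statement) =====
-- stated objective: alternative
-- what changed: Replaces A's re-flipping of all k pancakes at every leftmost '-' (plus a final rescan for '-') by a single left-to-right pass that tracks the flip count per position with a difference array, doing constant work per index.
import Mathlib
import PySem

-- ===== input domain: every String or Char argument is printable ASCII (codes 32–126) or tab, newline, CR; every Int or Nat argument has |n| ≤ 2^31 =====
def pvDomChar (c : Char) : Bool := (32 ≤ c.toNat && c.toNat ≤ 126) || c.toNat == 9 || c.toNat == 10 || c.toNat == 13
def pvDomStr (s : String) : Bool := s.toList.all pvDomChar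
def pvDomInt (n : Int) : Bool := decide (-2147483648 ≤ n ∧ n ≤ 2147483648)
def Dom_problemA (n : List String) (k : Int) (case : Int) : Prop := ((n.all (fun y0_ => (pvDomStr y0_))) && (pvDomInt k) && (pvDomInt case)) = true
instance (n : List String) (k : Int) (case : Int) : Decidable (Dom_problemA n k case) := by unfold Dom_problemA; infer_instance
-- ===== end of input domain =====

-- B is a single left-to-right pass that tracks the number of flips covering each position
-- with a difference array, instead of A's rewriting of the whole k-window at every flip and
-- final rescan; the equivalence is about the RETURN value (A also mutates its list argument
-- in place, B does not).

-- ===== PORT A =====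
-- inner loop 'for j in range(k): flip n[i+j]'
def flipWin (i k : Int) (a : List String) : List String :=
  (PySem.List.pyRange 0 k 1).foldl (fun a j =>
    if PySem.List.pyGetD a (i + j) "" = "+" then PySem.List.pySetD a (i + j) "-"
    else PySem.List.pySetD a (i + j) "+") a

-- loop body of A's 'for i in range(len(n))' over the state (current list, count)
def stepA (L k : Int) (st : List String × Int) (i : Int) : List String × Int :=
  if PySem.List.pyGetD st.1 i "" = "-" ∧ i + k ≤ L then (flipWin i k st.1, st.2 + 1) else st

def problemA (n : List String) (k : Int) (case : Int) : String :=
  let L : Int := n.length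
  let st := (PySem.List.pyRange 0 L 1).foldl (stepA L k) (n, 0)
  if st.1.contains "-" then "Case #" ++ PySem.Int.toStr case ++ ": IMPOSSIBLE\n"
  else "Case #" ++ PySem.Int.toStr case ++ ": " ++ PySem.Int.toStr st.2 ++ "\n"

-- ===== PORT B =====
-- loop body of B's single pass over the state (diff, c, count, bad)
def stepB (n : List String) (L k : Int) (st : List Int × Int × Int × Bool) (i : Int) :
    List Int × Int × Int × Bool :=
  let diff := st.1
  let c := st.2.1 + PySem.List.pyGetD diff i 0
  let count := st.2.2.1
  let bad := st.2.2.2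
  let s := PySem.List.pyGetD n i ""
  let eff := if c = 0 then s else if (s = "+") = (PySem.Int.mod c 2 = 1) then "-" else "+"
  if eff = "-" then
    if i + k ≤ L then
      if k > 0 then
        (PySem.List.pySetD diff (i + k) (PySem.List.pyGetD diff (i + k) 0 - 1), c + 1, count + 1, bad)
      else (diff, c, count + 1, true)
    else (diff, c, count, true)
  else (diff, c, count, bad)

def problemA_alt (n : List String) (k : Int) (case : Int) : String :=
  let L : Int := n.length
  let st := (PySem.List.pyRange 0 L 1).foldl (stepB n L k)
      (List.replicate (n.length + 1) 0, 0, 0, false)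
  if st.2.2.2 then "Case #" ++ PySem.Int.toStr case ++ ": IMPOSSIBLE\n"
  else "Case #" ++ PySem.Int.toStr case ++ ": " ++ PySem.Int.toStr st.2.2.1 ++ "\n"

-- ===== PRECONDITION & SPEC =====
def Spec_problemA (n : List String) (k : Int) (case : Int) (out : String) : Prop := out = problemA_alt n k case
instance (n : List String) (k : Int) (case : Int) (out : String) : Decidable (Spec_problemA n k case out) := by unfold Spec_problemA; infer_instance

-- ===== CLAIM (what is proved, stated in full; the proofs are below) =====
def Claim_equal_problemA : Prop := ∀ (n : List String) (k : Int) (case : Int), Dom_problemA n k case → Spec_problemA n k case (problemA n k case)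

-- ===== LEMMAS AND PROOFS =====

-- the value one Python flip gives an element
def toggle (s : String) : String := if s = "+" then "-" else "+"

-- the string an element with original value s shows after c flips (B's 'eff' expression)
def render (s : String) (c : Int) : String :=
  if c = 0 then s else if (s = "+") = (PySem.Int.mod c 2 = 1) then "-" else "+"

-- number of flips covering position p: c plus the pending diff entries i..p
def cov (diff : List Int) (c : Int) (i p : Nat) : Int :=
  c + ((List.range' i (p + 1 - i)).map (fun t => diff.getD t 0)).sum

lemma render_succ (s : String) (m : Int) (hm : 0 ≤ m) :
    toggle (render s m) = render s (m + 1) := by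
  unfold render toggle
  rw [PySem.Int.mod_eq_emod_of_pos (a := m) (by omega), PySem.Int.mod_eq_emod_of_pos (a := m + 1) (by omega)]
  rcases eq_or_lt_of_le hm with h0 | h0
  · simp only [← h0]
    norm_num
  · have hm0 : m ≠ 0 := by omega
    have hmod : m % 2 = 0 ∨ m % 2 = 1 := by omega
    by_cases hs : s = "+" <;> rcases hmod with hp | hp <;>
      simp [hs, hp, hm0, show m + 1 ≠ 0 by omega, show (m+1) % 2 = 1 - m % 2 by omega]

lemma flipWin_succ (i : Int) (m : Nat) (a : List String) :
    flipWin i (↑m + 1) a =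
      (let X := flipWin i ↑m a;
       if PySem.List.pyGetD X (i + ↑m) "" = "+" then PySem.List.pySetD X (i + ↑m) "-"
       else PySem.List.pySetD X (i + ↑m) "+") := by
  unfold flipWin
  rw [PySem.List.pyRange_one_succ_right (by positivity)]
  rw [List.foldl_append]
  rfl

lemma flipWin_spec (i m : Nat) (a : List String) (h : i + m ≤ a.length) :
    (flipWin ↑i ↑m a).length = a.length ∧
    (∀ p, (flipWin ↑i ↑m a).getD p "" =
      if i ≤ p ∧ p < i + m then toggle (a.getD p "") else a.getD p "") ∧
    (flipWin ↑i ↑m a).take i = a.take i := by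
  induction m with
  | zero =>
    unfold flipWin
    rw [PySem.List.pyRange_one_eq_nil (by omega)]
    simp
  | succ m ih =>
    obtain ⟨hlen, hget, htake⟩ := ih (by omega)
    have hcast : ((m + 1 : Nat) : Int) = (↑m + 1 : Int) := by push_cast; ring
    rw [hcast, flipWin_succ]
    set X := flipWin ↑i ↑m a with hX
    have him : i + m < a.length := by omega
    have hXm : X.getD (i + m) "" = a.getD (i + m) "" := by
      rw [hget (i + m), if_neg (by omega)]
    have hstep : (if PySem.List.pyGetD X (↑i + ↑m) "" = "+" then PySem.List.pySetD X (↑i + ↑m) "-"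
        else PySem.List.pySetD X (↑i + ↑m) "+") = X.set (i + m) (toggle (X.getD (i + m) "")) := by
      have hc : (↑i + ↑m : Int) = ((i + m : Nat) : Int) := by push_cast; ring
      rw [hc, PySem.List.pyGetD_natCast]
      unfold toggle
      split_ifs with hplus <;> exact PySem.List.pySetD_natCast ..
    simp only [hstep]
    refine ⟨by simp [hlen], ?_, ?_⟩
    · intro p
      by_cases hp : p = i + m
      · subst hp
        have hv : (X.set (i + m) (toggle (X.getD (i + m) ""))).getD (i + m) "" =
            toggle (X.getD (i + m) "") := by
          simp [List.getD_eq_getElem?_getD, hlen, him]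
        rw [hv, hXm, if_pos ⟨by omega, by omega⟩]
      · have : (X.set (i + m) (toggle (X.getD (i + m) ""))).getD p "" = X.getD p "" := by
          rw [List.getD_eq_getElem?_getD, List.getElem?_set_ne (by omega), ← List.getD_eq_getElem?_getD]
        rw [this, hget p]
        by_cases hin : i ≤ p ∧ p < i + m
        · rw [if_pos hin, if_pos (by omega)]
        · rw [if_neg hin, if_neg (by omega)]
    · rw [List.take_set_of_le (by omega), htake]

lemma cov_self (diff : List Int) (c : Int) (i : Nat) :
    cov diff c i i = c + diff.getD i 0 := by
  unfold cov
  simp [List.range'_one]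

lemma cov_shift (diff : List Int) (c : Int) (i p : Nat) (h : i ≤ p) :
    cov diff c i p = cov diff (c + diff.getD i 0) (i + 1) p := by
  unfold cov
  rw [show p + 1 - i = (p - i) + 1 by omega, List.range'_succ]
  simp [show p + 1 - (i + 1) = p - i by omega]
  ring

lemma cov_replicate (c : Int) (N i p : Nat) :
    cov (List.replicate N (0 : Int)) c i p = c := by
  unfold cov
  rw [List.sum_eq_zero]
  · ring
  · intro x hx
    simp only [List.mem_map] at hx
    obtain ⟨t, -, ht⟩ := hx
    rw [← ht]
    simp [List.getD_eq_getElem?_getD]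

lemma sum_map_getD_set (diff : List Int) (q : Nat) (v : Int) (hq : q < diff.length)
    (l : List Nat) :
    ((l.map (fun t => (diff.set q v).getD t 0)).sum : Int) =
      (l.map (fun t => diff.getD t 0)).sum + (l.count q) * (v - diff.getD q 0) := by
  induction l with
  | nil => simp
  | cons t l ih =>
    by_cases ht : t = q
    · subst ht
      have h1 : (diff.set t v).getD t 0 = v := by
        simp [List.getD_eq_getElem?_getD, hq]
      simp only [List.map_cons, List.sum_cons, ih, List.count_cons_self, h1]
      push_cast
      ring
    · have h1 : (diff.set q v).getD t 0 = diff.getD t 0 := by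
        simp [List.getD_eq_getElem?_getD, List.getElem?_set_ne (Ne.symm ht)]
      simp only [List.map_cons, List.sum_cons, ih, h1, List.count_cons_of_ne ht]
      ring

lemma cov_set (diff : List Int) (c : Int) (i p q : Nat) (v : Int) (hq : q < diff.length) :
    cov (diff.set q v) c i p =
      cov diff c i p + (if i ≤ q ∧ q ≤ p then v - diff.getD q 0 else 0) := by
  unfold cov
  rw [sum_map_getD_set diff q v hq]
  have hcnt : (List.range' i (p + 1 - i)).count q = if i ≤ q ∧ q ≤ p then 1 else 0 := by
    by_cases hmem : q ∈ List.range' i (p + 1 - i)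
    · rw [List.count_eq_one_of_mem (List.nodup_range') hmem]
      rw [List.mem_range'_1] at hmem
      rw [if_pos (by omega)]
    · rw [List.count_eq_zero.mpr hmem]
      rw [List.mem_range'_1] at hmem
      rw [if_neg (by omega)]
  rw [hcnt]
  split_ifs <;> push_cast <;> ring

lemma cov_add_one (diff : List Int) (c : Int) (i p : Nat) :
    cov diff (c + 1) i p = cov diff c i p + 1 := by unfold cov; ring


lemma take_succ_contains (l : List String) (i : Nat) (hi : i < l.length) (x : String) :
    (l.take (i + 1)).contains x = ((l.take i).contains x || (l.getD i "" == x)) := by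
  simp only [List.take_add_one, List.getElem?_eq_getElem hi, Option.toList_some,
    List.contains_append, List.contains_cons, List.contains_nil, Bool.or_false,
    List.getD_eq_getElem?_getD, Option.getD_some]
  congr 1
  exact Bool.beq_comm ..

lemma main_sim (n : List String) (k : Int) :
    ∀ (m i : Nat), i + m = n.length →
    ∀ (arr : List String) (diff : List Int) (c cnt : Int) (bad : Bool),
    arr.length = n.length →
    diff.length = n.length + 1 →
    (∀ p, i ≤ p → p < n.length → arr.getD p "" = render (n.getD p "") (cov diff c i p)) →
    (∀ p, i ≤ p → p ≤ n.length → 0 ≤ cov diff c i p) →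
    bad = (arr.take i).contains "-" →
    ((PySem.List.pyRange ↑i ↑n.length 1).foldl (stepB n ↑n.length k) (diff, c, cnt, bad)).2.2 =
      (((PySem.List.pyRange ↑i ↑n.length 1).foldl (stepA ↑n.length k) (arr, cnt)).2,
       ((PySem.List.pyRange ↑i ↑n.length 1).foldl (stepA ↑n.length k) (arr, cnt)).1.contains "-") := by
  intro m
  induction m with
  | zero =>
    intro i hi arr diff c cnt bad hlen hdlen harr hpos hbad
    rw [PySem.List.pyRange_one_eq_nil (by exact_mod_cast (by omega : n.length ≤ i))]
    simp only [List.foldl_nil]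
    have hta : arr.take i = arr := List.take_of_length_le (by omega)
    rw [hbad, hta]
  | succ m ih =>
    intro i hi arr diff c cnt bad hlen hdlen harr hpos hbad
    have hil : i < n.length := by omega
    rw [PySem.List.pyRange_one_cons (by exact_mod_cast hil)]
    simp only [List.foldl_cons]
    set c' := c + diff.getD i 0 with hc'
    have harri : arr.getD i "" = render (n.getD i "") c' := by
      rw [harr i (le_refl i) hil, cov_self]
    have hB : stepB n ↑n.length k (diff, c, cnt, bad) ↑i =
        (if render (n.getD i "") c' = "-" then
           if ↑i + k ≤ (↑n.length : Int) then
             if k > 0 then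
               (diff.set (i + k.toNat) (diff.getD (i + k.toNat) 0 - 1), c' + 1, cnt + 1, bad)
             else (diff, c', cnt + 1, true)
           else (diff, c', cnt, true)
         else (diff, c', cnt, bad)) := by
      unfold stepB render
      simp only [PySem.List.pyGetD_natCast]
      split_ifs with h1 h2 h3 <;> try rfl
      all_goals
        rw [show (↑i + k : Int) = ((i + k.toNat : Nat) : Int) by omega,
          PySem.List.pySetD_natCast, PySem.List.pyGetD_natCast]
    have hA : stepA ↑n.length k (arr, cnt) ↑i =
        (if render (n.getD i "") c' = "-" ∧ ↑i + k ≤ (↑n.length : Int) then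
           (flipWin ↑i k arr, cnt + 1) else (arr, cnt)) := by
      unfold stepA
      simp only [PySem.List.pyGetD_natCast]
      rw [harri]
    rw [hA, hB]
    have hcast1 : ((↑i : Int) + 1) = ((i + 1 : Nat) : Int) := by push_cast; ring
    by_cases heff : render (n.getD i "") c' = "-"
    · by_cases hle : (↑i : Int) + k ≤ (↑n.length : Int)
      · by_cases hk : k > 0
        · -- flip case
          set kt := k.toNat with hkt
          have hq : i + kt ≤ n.length := by omega
          have hkk : (↑kt : Int) = k := by omega
          obtain ⟨hflen, hfget, hftake⟩ := flipWin_spec i kt arr (by omega)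
          rw [if_pos (And.intro heff hle), if_pos heff, if_pos hle, if_pos hk]
          have hfw : flipWin ↑i k arr = flipWin ↑i ↑kt arr := by rw [hkk]
          rw [hfw, hcast1]
          apply ih (i + 1) (by omega)
          · rw [hflen, hlen]
          · simp [hdlen]
          · intro p hp1 hp2
            rw [hfget p]
            have hiq : i + 1 ≤ i + kt := by omega
            have hqlt : i + kt < diff.length := by omega
            rw [cov_set diff (c' + 1) (i + 1) p (i + kt) _ hqlt, cov_add_one,
              ← cov_shift diff c i p (by omega)]
            by_cases hpq : p < i + kt
            · rw [if_pos (show i ≤ p ∧ p < i + kt by omega),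
                if_neg (show ¬(i + 1 ≤ i + kt ∧ i + kt ≤ p) by omega)]
              rw [show cov diff c i p + 1 + 0 = cov diff c i p + 1 by ring,
                ← render_succ _ _ (hpos p (by omega) (by omega)), harr p (by omega) hp2]
            · rw [if_neg (show ¬(i ≤ p ∧ p < i + kt) by omega),
                if_pos (show i + 1 ≤ i + kt ∧ i + kt ≤ p by omega)]
              rw [harr p (by omega) hp2]
              congr 1
              ring
          · intro p hp1 hp2
            have hqlt : i + kt < diff.length := by omega
            rw [cov_set diff (c' + 1) (i + 1) p (i + kt) _ hqlt, cov_add_one,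
              ← cov_shift diff c i p (by omega)]
            have := hpos p (by omega) hp2
            split_ifs <;> omega
          · rw [hbad, take_succ_contains _ i (by omega) _, hftake]
            rw [hfget i, if_pos ⟨le_refl i, by omega⟩, harri, heff]
            simp [toggle]
        · -- k ≤ 0 : flip is empty, B sets bad
          rw [if_pos (And.intro heff hle), if_pos heff, if_pos hle, if_neg hk]
          have hfe : flipWin ↑i k arr = arr := by
            unfold flipWin
            rw [PySem.List.pyRange_one_eq_nil (by omega)]
            rfl
          rw [hfe, hcast1]
          apply ih (i + 1) (by omega) arr diff c' (cnt + 1) true hlen hdlen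
          · intro p hp1 hp2
            rw [harr p (by omega) hp2, cov_shift diff c i p (by omega)]
          · intro p hp1 hp2
            rw [← cov_shift diff c i p (by omega)]
            exact hpos p (by omega) hp2
          · rw [take_succ_contains _ i (by omega) _, harri, heff]
            simp
      · -- cannot flip: A skips, B sets bad
        rw [if_neg (show ¬(render (n.getD i "") c' = "-" ∧ (↑i:Int) + k ≤ (↑n.length:Int)) from fun h => hle h.2),
          if_pos heff, if_neg hle]
        rw [hcast1]
        apply ih (i + 1) (by omega) arr diff c' cnt true hlen hdlen
        · intro p hp1 hp2
          rw [harr p (by omega) hp2, cov_shift diff c i p (by omega)]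
        · intro p hp1 hp2
          rw [← cov_shift diff c i p (by omega)]
          exact hpos p (by omega) hp2
        · rw [take_succ_contains _ i (by omega) _, harri, heff]
          simp
    · -- not "-": both skip
      rw [if_neg (show ¬(render (n.getD i "") c' = "-" ∧ (↑i:Int) + k ≤ (↑n.length:Int)) from fun h => heff h.1),
        if_neg heff]
      rw [hcast1]
      apply ih (i + 1) (by omega) arr diff c' cnt bad hlen hdlen
      · intro p hp1 hp2
        rw [harr p (by omega) hp2, cov_shift diff c i p (by omega)]
      · intro p hp1 hp2
        rw [← cov_shift diff c i p (by omega)]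
        exact hpos p (by omega) hp2
      · rw [hbad, take_succ_contains _ i (by omega) _, harri]
        have hfalse : (render (n.getD i "") c' == "-") = false := by
          simpa using heff
        rw [hfalse]
        simp

-- ===== VERDICT (by name: the statement is the Claim_ definition above) =====
theorem problemA_spec : Claim_equal_problemA := by
  intro n k case _
  unfold Spec_problemA
  simp only [problemA, problemA_alt]
  have h := main_sim n k n.length 0 (by omega) n (List.replicate (n.length + 1) 0) 0 0 false
    rfl (by simp) (by intro p _ _; rw [cov_replicate]; simp [render])
    (by intro p _ _; rw [cov_replicate]) (by simp)
  simp only [Nat.cast_zero] at h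
  have h1 := congrArg Prod.fst h
  have h2 := congrArg Prod.snd h
  simp only at h1 h2
  rw [h1, h2]
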